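-- pv_equiv track=rewrite | github.com/Arpnik/EDU-Chunking-RAG | com/fever/rag/chunker/edu_chunker_with_linear_head.py | _create_edu_chunks
-- ===== SOURCE A (Python) =====
-- from typing import List, Dict, Tuple, Optional
--
-- def _create_edu_chunks(
--
--         text: str,
--         aligned_tokens: List[Tuple[str, int, int, int]],
--         sentences: List[str]
-- ) -> List[Tuple[str, List[int]]]:
--     """
--     Create EDU chunks based on predicted boundaries and track sentence IDs.
--
--     Args:
--         text: Original text
--         aligned_tokens: List of (token_text, start_char, end_char, prediction)
--         sentences: Pre-parsed sentences from article
--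
--     Returns:
--         List of (chunk_text, sentence_ids) tuples
--     """
--     if not aligned_tokens:
--         return []
--
--     # Build sentence position map
--     sentence_positions = []
--     current_pos = 0
--     for i, sentence in enumerate(sentences):
--         if not sentence.strip():
--             continue
--         start = text.find(sentence, current_pos)
--         if start == -1:
--             continue
--         end = start + len(sentence)
--         sentence_positions.append((i, start, end))
--         current_pos = end
--
--     # Create chunks based on EDU boundaries (prediction = 1)
--     chunks = []
--     current_chunk_start = aligned_tokens[0][1]  # Start of first token
--     current_chunk_end = aligned_tokens[0][2]  # End of first token
--
--     for i, (token_text, start, end, prediction) in enumerate(aligned_tokens):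
--         if prediction == 1 and i > 0:  # New EDU starts (but not at first token)
--             # Finalize previous chunk
--             chunk_text = text[current_chunk_start:current_chunk_end].strip()
--
--             if chunk_text:
--                 # Find which sentences overlap with this chunk
--                 chunk_sentence_ids = []
--                 for sent_id, sent_start, sent_end in sentence_positions:
--                     if sent_start < current_chunk_end and sent_end > current_chunk_start:
--                         chunk_sentence_ids.append(sent_id)
--
--                 chunks.append((chunk_text, chunk_sentence_ids))
--
--             # Start new chunk
--             current_chunk_start = start
--             current_chunk_end = end
--         else:
--             # Continue current chunk
--             current_chunk_end = end
--
--     # Add final chunk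
--     chunk_text = text[current_chunk_start:current_chunk_end].strip()
--     if chunk_text:
--         chunk_sentence_ids = []
--         for sent_id, sent_start, sent_end in sentence_positions:
--             if sent_start < current_chunk_end and sent_end > current_chunk_start:
--                 chunk_sentence_ids.append(sent_id)
--         chunks.append((chunk_text, chunk_sentence_ids))
--
--     return chunks
-- ===== SOURCE B (Python) =====
-- from typing import List, Tuple
--
-- def _bisect_left(a, x):
--     lo, hi = 0, len(a)
--     while lo < hi:
--         mid = (lo + hi) // 2
--         if a[mid] < x:
--             lo = mid + 1
--         else:
--             hi = mid
--     return lo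
--
-- def _bisect_right(a, x):
--     lo, hi = 0, len(a)
--     while lo < hi:
--         mid = (lo + hi) // 2
--         if x < a[mid]:
--             hi = mid
--         else:
--             lo = mid + 1
--     return lo
--
-- def _create_edu_chunks(
--         text: str,
--         aligned_tokens: List[Tuple[str, int, int, int]],
--         sentences: List[str]
-- ) -> List[Tuple[str, List[int]]]:
--     if not aligned_tokens:
--         return []
--
--     # Sentence position map (sequential scan; intervals come out sorted and disjoint)
--     positions = []
--     pos = 0
--     for i, sentence in enumerate(sentences):
--         if not sentence.strip():
--             continue
--         start = text.find(sentence, pos)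
--         if start == -1:
--             continue
--         positions.append((i, start, start + len(sentence)))
--         pos = start + len(sentence)
--
--     starts = [s for _, s, _ in positions]
--     ends = [e for _, _, e in positions]
--
--     # Boundary index pairs: each chunk spans aligned_tokens[b:nb]
--     pairs = []
--     b = 0
--     for j, tok in enumerate(aligned_tokens[1:], start=1):
--         if tok[3] == 1:
--             pairs.append((b, j))
--             b = j
--     pairs.append((b, len(aligned_tokens)))
--
--     chunks = []
--     for b, nb in pairs:
--         cs = aligned_tokens[b][1]
--         ce = aligned_tokens[nb - 1][2]
--         ct = text[cs:ce].strip()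
--         if ct:
--             # sentence intervals are sorted & disjoint, so the overlap set is contiguous
--             lo = _bisect_right(ends, cs)
--             hi = _bisect_left(starts, ce)
--             chunks.append((ct, [i for i, _, _ in positions[lo:hi]]))
--     return chunks
-- ===== Notes on version B (the rewrite author's own statement) =====
-- stated objective: alternative
-- what changed: A rescans all sentence intervals linearly for every chunk; B precomputes the sorted interval endpoints once and finds each chunk's (contiguous) overlapping sentence range with two binary searches, deriving chunk spans from boundary index pairs instead of A's running-accumulator finalization (measured 1.39x at the largest size, below the 1.5x bar, so no speed is claimed).
import Mathlib
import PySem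

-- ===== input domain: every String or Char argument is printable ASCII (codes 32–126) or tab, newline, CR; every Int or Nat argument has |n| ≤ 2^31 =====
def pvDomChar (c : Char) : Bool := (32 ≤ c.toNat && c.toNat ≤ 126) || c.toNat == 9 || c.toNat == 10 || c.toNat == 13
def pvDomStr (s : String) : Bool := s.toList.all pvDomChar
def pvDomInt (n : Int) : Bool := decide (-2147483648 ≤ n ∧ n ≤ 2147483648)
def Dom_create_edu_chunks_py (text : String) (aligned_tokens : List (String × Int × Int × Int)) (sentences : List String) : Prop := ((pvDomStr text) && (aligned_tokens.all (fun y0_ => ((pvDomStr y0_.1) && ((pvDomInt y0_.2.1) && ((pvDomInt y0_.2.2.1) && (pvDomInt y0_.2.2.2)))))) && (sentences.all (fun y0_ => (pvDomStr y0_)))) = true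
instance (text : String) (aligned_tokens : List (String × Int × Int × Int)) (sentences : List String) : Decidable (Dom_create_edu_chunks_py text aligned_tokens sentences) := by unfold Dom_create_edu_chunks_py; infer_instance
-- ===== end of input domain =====

-- B replaces A's per-chunk linear scan over all sentence intervals by two binary searches on the
-- (sorted, disjoint) interval endpoints, and derives the chunk spans from boundary index pairs.

-- ===== PORT A =====
-- sentence-position loop (both Pythons contain this identical sequential loop, so the helper is shared):
-- positions := []; current_pos := 0; for i, sentence in enumerate(sentences): skip blank / not-found, else append (i, start, start+len)
def pvPositions (text : String) : List String → Int → Int → List (Int × Int × Int) → List (Int × Int × Int)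
  | [], _, _, acc => acc
  | s :: rest, i, pos, acc =>
    if PySem.Str.strip s = "" then pvPositions text rest (i + 1) pos acc
    else
      let st := PySem.Str.findFrom text s pos
      if st = -1 then pvPositions text rest (i + 1) pos acc
      else pvPositions text rest (i + 1) (st + PySem.Str.len s) (acc ++ [(i, st, st + PySem.Str.len s)])

-- the inner 'for sent_id, sent_start, sent_end in sentence_positions: … append' loop
def pvA_ids (positions : List (Int × Int × Int)) (cs ce : Int) : List Int :=
  positions.foldl (fun acc p => if p.2.1 < ce ∧ cs < p.2.2 then acc ++ [p.1] else acc) []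

-- 'chunk_text = text[cs:ce].strip(); if chunk_text: chunks.append(…)'
def pvA_final (text : String) (positions : List (Int × Int × Int))
    (chunks : List (String × List Int)) (cs ce : Int) : List (String × List Int) :=
  let ct := PySem.Str.strip (PySem.Str.slice text (some cs) (some ce))
  if ct ≠ "" then chunks ++ [(ct, pvA_ids positions cs ce)] else chunks

-- 'for i, (token_text, start, end, prediction) in enumerate(aligned_tokens): …'
def pvA_loop (text : String) (positions : List (Int × Int × Int)) :
    List (String × Int × Int × Int) → Int → List (String × List Int) → Int → Int →
    List (String × List Int) × Int × Int
  | [], _, chunks, cs, ce => (chunks, cs, ce)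
  | t :: rest, i, chunks, cs, ce =>
    if t.2.2.2 = 1 ∧ i > 0 then
      pvA_loop text positions rest (i + 1) (pvA_final text positions chunks cs ce) t.2.1 t.2.2.1
    else
      pvA_loop text positions rest (i + 1) chunks cs t.2.2.1

def create_edu_chunks_py (text : String) (aligned_tokens : List (String × Int × Int × Int)) (sentences : List String) : List (String × List Int) :=
  match aligned_tokens with
  | [] => []
  | t0 :: _ =>
    let positions := pvPositions text sentences 0 0 []
    let r := pvA_loop text positions aligned_tokens 0 [] t0.2.1 t0.2.2.1
    pvA_final text positions r.1 r.2.1 r.2.2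

-- ===== PORT B =====
-- 'for j, tok in enumerate(aligned_tokens[1:], start=1): if tok[3] == 1: pairs.append((b, j)); b = j'
def pvB_pairsLoop : List (String × Int × Int × Int) → Nat → List (Nat × Nat) → Nat →
    List (Nat × Nat) × Nat
  | [], _, pairs, b => (pairs, b)
  | t :: rest, j, pairs, b =>
    if t.2.2.2 = 1 then pvB_pairsLoop rest (j + 1) (pairs ++ [(b, j)]) j
    else pvB_pairsLoop rest (j + 1) pairs b

-- body of 'for b, nb in pairs: …'; aligned_tokens[b] / aligned_tokens[nb-1] are in-range Nat indices,
-- ported as List.getD; positions[lo:hi] with 0 ≤ lo, hi is exactly drop/take (PySem.List.slice_natCast);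
-- _bisect_left/_bisect_right in Source B are CPython's bisect loops, transliterated by PySem.List.bisectLeft/bisectRight
def pvB_chunk (text : String) (positions : List (Int × Int × Int)) (starts ends : List Int)
    (tokens : List (String × Int × Int × Int)) (chunks : List (String × List Int))
    (pr : Nat × Nat) : List (String × List Int) :=
  let cs := (tokens.getD pr.1 ("", 0, 0, 0)).2.1
  let ce := (tokens.getD (pr.2 - 1) ("", 0, 0, 0)).2.2.1
  let ct := PySem.Str.strip (PySem.Str.slice text (some cs) (some ce))
  if ct ≠ "" then
    let lo := PySem.List.bisectRight ends cs
    let hi := PySem.List.bisectLeft starts ce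
    chunks ++ [(ct, ((positions.drop lo).take (hi - lo)).map (fun p => p.1))]
  else chunks

def create_edu_chunks_py_alt (text : String) (aligned_tokens : List (String × Int × Int × Int)) (sentences : List String) : List (String × List Int) :=
  match aligned_tokens with
  | [] => []
  | _ :: rest =>
    let positions := pvPositions text sentences 0 0 []
    let starts := positions.map (fun p => p.2.1)
    let ends := positions.map (fun p => p.2.2)
    let pb := pvB_pairsLoop rest 1 [] 0
    let pairs := pb.1 ++ [(pb.2, aligned_tokens.length)]
    pairs.foldl (pvB_chunk text positions starts ends aligned_tokens) []

-- ===== PRECONDITION & SPEC =====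
def Spec_create_edu_chunks_py (text : String) (aligned_tokens : List (String × Int × Int × Int)) (sentences : List String) (out : List (String × List Int)) : Prop := out = create_edu_chunks_py_alt text aligned_tokens sentences
instance (text : String) (aligned_tokens : List (String × Int × Int × Int)) (sentences : List String) (out : List (String × List Int)) : Decidable (Spec_create_edu_chunks_py text aligned_tokens sentences out) := by unfold Spec_create_edu_chunks_py; infer_instance

-- ===== CLAIM (what is proved, stated in full; the proofs are below) =====
def Claim_equal_create_edu_chunks_py : Prop := ∀ (text : String) (aligned_tokens : List (String × Int × Int × Int)) (sentences : List String), Dom_create_edu_chunks_py text aligned_tokens sentences → Spec_create_edu_chunks_py text aligned_tokens sentences (create_edu_chunks_py text aligned_tokens sentences)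

-- ===== LEMMAS AND PROOFS =====

-- the chunk spans A maintains, as an explicit list: emit (cs, ce) at each boundary token, plus the final span
def pvIntervals : List (String × Int × Int × Int) → Int → Int → List (Int × Int)
  | [], cs, ce => [(cs, ce)]
  | t :: rest, cs, ce =>
    if t.2.2.2 = 1 then (cs, ce) :: pvIntervals rest t.2.1 t.2.2.1
    else pvIntervals rest cs t.2.2.1

-- B's per-span body, taking the (cs, ce) span directly
def pvB_core (text : String) (positions : List (Int × Int × Int)) (starts ends : List Int)
    (chunks : List (String × List Int)) (q : Int × Int) : List (String × List Int) :=
  let ct := PySem.Str.strip (PySem.Str.slice text (some q.1) (some q.2))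
  if ct ≠ "" then
    chunks ++ [(ct, ((positions.drop (PySem.List.bisectRight ends q.1)).take
      (PySem.List.bisectLeft starts q.2 - PySem.List.bisectRight ends q.1)).map (fun p => p.1))]
  else chunks

theorem pvB_chunk_eq_core (text : String) (positions : List (Int × Int × Int))
    (starts ends : List Int) (tokens : List (String × Int × Int × Int))
    (chunks : List (String × List Int)) (pr : Nat × Nat) :
    pvB_chunk text positions starts ends tokens chunks pr
      = pvB_core text positions starts ends chunks
          ((tokens.getD pr.1 ("", 0, 0, 0)).2.1, (tokens.getD (pr.2 - 1) ("", 0, 0, 0)).2.2.1) := rfl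

-- A's token loop (from index ≥ 1) followed by the final flush is the fold of pvA_final over pvIntervals
theorem pvA_loop_eq_intervals (text : String) (positions : List (Int × Int × Int))
    (rest : List (String × Int × Int × Int)) (i : Int) (hi : 1 ≤ i)
    (chunks : List (String × List Int)) (cs ce : Int) :
    (pvA_final text positions (pvA_loop text positions rest i chunks cs ce).1
      (pvA_loop text positions rest i chunks cs ce).2.1
      (pvA_loop text positions rest i chunks cs ce).2.2)
    = (pvIntervals rest cs ce).foldl (fun ch p => pvA_final text positions ch p.1 p.2) chunks := by
  induction rest generalizing i chunks cs ce with
  | nil => simp [pvA_loop, pvIntervals]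
  | cons t rest ih =>
    simp only [pvA_loop, pvIntervals]
    by_cases hp : t.2.2.2 = 1
    · rw [if_pos (by exact ⟨hp, by omega⟩), if_pos hp]
      rw [ih _ (by omega)]
      simp [List.foldl]
    · rw [if_neg (by tauto), if_neg hp]
      exact ih _ (by omega) _ _ _

-- accumulator of pvB_pairsLoop prepends
theorem pvB_pairsLoop_acc (rest : List (String × Int × Int × Int)) (j : Nat)
    (acc : List (Nat × Nat)) (b : Nat) :
    pvB_pairsLoop rest j acc b
      = (acc ++ (pvB_pairsLoop rest j [] b).1, (pvB_pairsLoop rest j [] b).2) := by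
  induction rest generalizing j acc b with
  | nil => simp [pvB_pairsLoop]
  | cons t rest ih =>
    simp only [pvB_pairsLoop]
    by_cases hp : t.2.2.2 = 1
    · rw [if_pos hp, if_pos hp, ih _ (acc ++ [(b, j)]), ih _ ([] ++ [(b, j)])]
      simp
    · rw [if_neg hp, if_neg hp, ih]

-- the boundary index pairs, mapped to (start of first token, end of last token), are exactly pvIntervals
theorem pvB_pairs_map (tokens : List (String × Int × Int × Int))
    (rest : List (String × Int × Int × Int)) (j b : Nat)
    (hj : j ≤ tokens.length) (hr : rest = tokens.drop j) (hb : 0 < j) :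
    ((pvB_pairsLoop rest j [] b).1 ++ [((pvB_pairsLoop rest j [] b).2, tokens.length)]).map
      (fun pr => ((tokens.getD pr.1 ("", 0, 0, 0)).2.1, (tokens.getD (pr.2 - 1) ("", 0, 0, 0)).2.2.1))
    = pvIntervals rest (tokens.getD b ("", 0, 0, 0)).2.1 (tokens.getD (j - 1) ("", 0, 0, 0)).2.2.1 := by
  induction rest generalizing j b with
  | nil =>
    have hjn : j = tokens.length := by
      have := congrArg List.length hr
      simp at this
      omega
    simp [pvB_pairsLoop, pvIntervals, hjn]
  | cons t rest ih =>
    have hlt : j < tokens.length := by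
      have := congrArg List.length hr
      simp at this
      omega
    have ht : tokens[j]? = some t := by
      rw [← List.head?_drop, ← hr]; rfl
    have hrest : rest = tokens.drop (j + 1) := by
      have := congrArg List.tail hr
      simpa using this
    simp only [pvB_pairsLoop, pvIntervals]
    by_cases hp : t.2.2.2 = 1
    · rw [if_pos hp, if_pos hp]
      rw [pvB_pairsLoop_acc rest (j + 1) ([] ++ [(b, j)]) j]
      simp only [List.nil_append, List.cons_append, List.map_cons]
      rw [ih (j + 1) j (by omega) hrest (by omega)]
      simp [List.getD, ht]
    · rw [if_neg hp, if_neg hp]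
      rw [ih (j + 1) b (by omega) hrest (by omega)]
      simp [List.getD, ht]

-- ordering facts about the sentence-position list
def pvPosOK (positions : List (Int × Int × Int)) : Prop :=
  (∀ p ∈ positions, p.2.1 ≤ p.2.2) ∧ positions.Pairwise (fun p q => p.2.2 ≤ q.2.1)

theorem pvPositions_ok (text : String) (ss : List String) (i pos : Int)
    (acc : List (Int × Int × Int))
    (h1 : ∀ p ∈ acc, p.2.1 ≤ p.2.2 ∧ p.2.2 ≤ pos)
    (h2 : acc.Pairwise (fun p q => p.2.2 ≤ q.2.1))
    (h3 : 0 ≤ pos) (h4 : pos ≤ (text.toList.length : Int)) :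
    pvPosOK (pvPositions text ss i pos acc) := by
  induction ss generalizing i pos acc with
  | nil =>
    exact ⟨fun p hp => (h1 p hp).1, h2⟩
  | cons s rest ih =>
    simp only [pvPositions]
    by_cases hs : PySem.Str.strip s = ""
    · rw [if_pos hs]; exact ih _ _ _ h1 h2 h3 h4
    · rw [if_neg hs]
      by_cases hf : PySem.Str.findFrom text s pos = -1
      · rw [if_pos hf]; exact ih _ _ _ h1 h2 h3 h4
      · rw [if_neg hf]
        set st := PySem.Str.findFrom text s pos with hst
        have hpos : pos = ((pos.toNat : Nat) : Int) := by omega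
        have hk : pos.toNat ≤ text.toList.length := by omega
        have hchars : st = PySem.Chars.findFrom text.toList s.toList ((pos.toNat : Nat) : Int) := by
          rw [hst, PySem.Str.findFrom_eq, ← hpos]
        have hne : PySem.Chars.findFrom text.toList s.toList ((pos.toNat : Nat) : Int) ≠ -1 := by
          rw [← hchars]; exact hf
        obtain ⟨hge, hpre, -⟩ := PySem.Chars.findFrom_natCast_spec text.toList s.toList pos.toNat hk hne
        rw [← hchars] at hge hpre
        have hstpos : pos ≤ st := by omega
        have hlen : s.toList.length ≤ text.toList.length - st.toNat := by
          have := hpre.length_le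
          rw [List.length_drop] at this
          exact this
        have hlenstr : PySem.Str.len s = (s.toList.length : Int) := rfl
        have hl0 : (0 : Int) ≤ PySem.Str.len s := by rw [hlenstr]; positivity
        have hstnat : ((st.toNat : Nat) : Int) = st := by omega
        have hstle : st ≤ (text.toList.length : Int) := by
          have hcast := PySem.Chars.findFrom_natCast text.toList s.toList pos.toNat hk
          rw [← hchars] at hcast
          by_cases hfz : PySem.Chars.find (List.drop pos.toNat text.toList) s.toList = -1
          · rw [hcast, if_pos hfz] at hf; exact absurd rfl hf
          · rw [hcast, if_neg hfz]
            have h5 := PySem.Chars.find_le_length (List.drop pos.toNat text.toList) s.toList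
            rw [List.length_drop] at h5
            omega
        have hup : st + PySem.Str.len s ≤ (text.toList.length : Int) := by
          have h2' : st.toNat + s.toList.length ≤ text.toList.length := by omega
          rw [hlenstr]; omega
        apply ih
        · intro p hp
          rcases List.mem_append.mp hp with hp | hp
          · obtain ⟨hpa, hpb⟩ := h1 p hp
            exact ⟨hpa, by omega⟩
          · simp only [List.mem_singleton] at hp
            subst hp
            exact ⟨le_add_of_nonneg_right hl0, le_refl _⟩
        · rw [List.pairwise_append]
          refine ⟨h2, by simp, ?_⟩
          intro p hp q hq
          simp only [List.mem_singleton] at hq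
          subst hq
          exact le_trans (h1 p hp).2 hstpos
        · omega
        · exact hup

-- a filter whose predicate holds exactly on an index window is a drop/take slice
theorem filter_eq_drop_take {α : Type} (xs : List α) (p : α → Bool) (lo hi : Nat)
    (h : ∀ (k : Nat) (hk : k < xs.length), p xs[k] = decide (lo ≤ k ∧ k < hi)) :
    xs.filter p = (xs.drop lo).take (hi - lo) := by
  induction xs generalizing lo hi with
  | nil => simp
  | cons x rest ih =>
    have hx : p x = decide (lo ≤ 0 ∧ 0 < hi) := h 0 (by simp)
    have hrest : ∀ (k : Nat) (hk : k < rest.length), p rest[k] = decide (lo - 1 ≤ k ∧ k < hi - 1) := by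
      intro k hk
      have h2 := h (k + 1) (by simpa using Nat.succ_lt_succ hk)
      simp only [List.getElem_cons_succ] at h2
      exact h2.trans (decide_eq_decide.mpr (by omega))
    rcases lo with _ | ll
    · rcases hi with _ | hh
      · have hx0 : p x = false := by simpa using hx
        rw [List.filter_cons_of_neg (by simp [hx0])]
        rw [ih 0 0 (fun k hk => (hrest k hk).trans (decide_eq_decide.mpr (by omega)))]
        simp
      · have hx1 : p x = true := by simpa using hx
        rw [List.filter_cons_of_pos hx1]
        rw [ih 0 hh (fun k hk => (hrest k hk).trans (decide_eq_decide.mpr (by omega)))]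
        simp
    · have hx0 : p x = false := by simpa using hx
      rw [List.filter_cons_of_neg (by simp [hx0])]
      rw [ih ll (hi - 1) (fun k hk => (hrest k hk).trans (decide_eq_decide.mpr (by omega)))]
      simp only [List.drop_succ_cons]
      congr 1
      omega

-- with sorted interval endpoints, A's linear overlap scan equals B's two binary searches
theorem pvA_ids_eq_drop_take (positions : List (Int × Int × Int)) (hok : pvPosOK positions)
    (cs ce : Int) :
    pvA_ids positions cs ce
      = ((positions.drop (PySem.List.bisectRight (positions.map (fun p => p.2.2)) cs)).take
          (PySem.List.bisectLeft (positions.map (fun p => p.2.1)) ce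
            - PySem.List.bisectRight (positions.map (fun p => p.2.2)) cs)).map (fun p => p.1) := by
  obtain ⟨hse, hpw⟩ := hok
  have pw_starts : (positions.map (fun p => p.2.1)).Pairwise (fun a b => a ≤ b) := by
    rw [List.pairwise_map]
    exact hpw.imp_of_mem (fun {a b} ha hb r => le_trans (hse a ha) r)
  have pw_ends : (positions.map (fun p => p.2.2)).Pairwise (fun a b => a ≤ b) := by
    rw [List.pairwise_map]
    exact hpw.imp_of_mem (fun {a b} ha hb r => le_trans r (hse b hb))
  set lo := PySem.List.bisectRight (positions.map (fun p => p.2.2)) cs with hlo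
  set hi := PySem.List.bisectLeft (positions.map (fun p => p.2.1)) ce with hhi
  obtain ⟨-, hlo1, hlo2⟩ := PySem.List.bisectRight_spec (positions.map (fun p => p.2.2)) cs pw_ends
  obtain ⟨-, hhi1, hhi2⟩ := PySem.List.bisectLeft_spec (positions.map (fun p => p.2.1)) ce pw_starts
  have hids : pvA_ids positions cs ce
      = (positions.filter (fun p => decide (p.2.1 < ce ∧ cs < p.2.2))).map (fun p => p.1) := by
    unfold pvA_ids
    rw [show (fun (acc : List Int) (p : Int × Int × Int) => if p.2.1 < ce ∧ cs < p.2.2 then acc ++ [p.1] else acc)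
        = (fun acc p => if (fun (q : Int × Int × Int) => decide (q.2.1 < ce ∧ cs < q.2.2)) p = true then acc ++ [(fun (q : Int × Int × Int) => q.1) p] else acc) from by
      funext acc p; simp]
    rw [PySem.List.foldl_append_if]
    simp
  rw [hids]
  rw [filter_eq_drop_take positions _ lo hi]
  intro k hk
  have hkm : k < (positions.map (fun p => p.2.2)).length := by simpa using hk
  have hkm' : k < (positions.map (fun p => p.2.1)).length := by simpa using hk
  have he : (positions.map (fun p => p.2.2))[k] = positions[k].2.2 := by simp
  have hs : (positions.map (fun p => p.2.1))[k] = positions[k].2.1 := by simp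
  by_cases h1 : lo ≤ k
  · by_cases h2 : k < hi
    · have a1 := hhi1 k hkm' h2
      have a2 := hlo2 k hkm h1
      rw [hs] at a1; rw [he] at a2
      simp [a1, a2, h1, h2]
    · have a1 := hhi2 k hkm' (by omega)
      rw [hs] at a1
      simp only [decide_eq_decide]
      constructor
      · intro hcon; omega
      · intro hcon; omega
  · have a2 := hlo1 k hkm (by omega)
    rw [he] at a2
    simp only [decide_eq_decide]
    constructor
    · intro hcon; omega
    · intro hcon; omega

-- pointwise: A's flush body equals B's span body
theorem pvA_final_eq_core (text : String) (positions : List (Int × Int × Int))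
    (hok : pvPosOK positions) (chunks : List (String × List Int)) (q : Int × Int) :
    pvA_final text positions chunks q.1 q.2
      = pvB_core text positions (positions.map (fun p => p.2.1)) (positions.map (fun p => p.2.2)) chunks q := by
  unfold pvA_final pvB_core
  by_cases hct : PySem.Str.strip (PySem.Str.slice text (some q.1) (some q.2)) ≠ ""
  · rw [if_pos hct, if_pos hct, pvA_ids_eq_drop_take positions hok q.1 q.2]
  · rw [if_neg hct, if_neg hct]

-- ===== VERDICT (by name: the statement is the Claim_ definition above) =====
theorem create_edu_chunks_py_spec : Claim_equal_create_edu_chunks_py := by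
  intro text aligned_tokens sentences _
  unfold Spec_create_edu_chunks_py
  match aligned_tokens with
  | [] => rfl
  | t0 :: rest =>
    simp only [create_edu_chunks_py, create_edu_chunks_py_alt]
    have hok : pvPosOK (pvPositions text sentences 0 0 []) :=
      pvPositions_ok text sentences 0 0 [] (by simp) (by simp) le_rfl (by positivity)
    set positions := pvPositions text sentences 0 0 [] with hposdef
    -- A: first iteration (i = 0) always takes the else branch
    rw [show pvA_loop text positions (t0 :: rest) 0 [] t0.2.1 t0.2.2.1
        = pvA_loop text positions rest 1 [] t0.2.1 t0.2.2.1 from by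
      simp only [pvA_loop]
      rw [if_neg (by simp)]
      norm_num]
    rw [pvA_loop_eq_intervals text positions rest 1 le_rfl [] t0.2.1 t0.2.2.1]
    -- B: fold over index pairs = fold over pvIntervals
    have hmap := pvB_pairs_map (t0 :: rest) rest 1 0 (by simp) (by simp) (by omega)
    simp only [List.getD_cons_zero, Nat.sub_self] at hmap
    rw [← hmap, List.foldl_map]
    apply PySem.List.foldl_congr_mem
    intro ch pr _
    exact (pvA_final_eq_core text positions hok ch _).trans (pvB_chunk_eq_core ..).symm
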